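-- pv_equiv track=rewrite | github.com/yakubyusufali/warzywniak_banino | site_app/utils.py | prepare_new_item_list_data
-- ===== SOURCE A (Python) =====
-- from typing import Dict, Tuple, Any
--
-- def prepare_new_item_list_data(data: Dict[str, str]) -> Dict[str, Dict[str, str]]:
--     """
--     Processes input data containing product name, data type and it's value to structured dictionary containing product
--     names, and it's params values.
--
--     Function filters input data, ignores technical keys, splits input keys into product names and data types, checks if
--     product is already in created structured dictionary and ads it if not. Function ads values to those params for each
--     product and returns structured dictionary containing all products and all values.
--
--     :param data:
--     A dictionary containing key in 'product_name-data_type' format and values of each parameter of each product.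
--     Contains also technical keys.
--
--     :return:
--     A structured dictionary of dictionaries, containing product names as a main key and a dictionary containing values
--     of its params as a main key value.
--     """
--     new_data = {}
--     for key in filter(lambda x: x != 'csrfmiddlewaretoken', data):
--         item_name, data_type = key.split('-')
--         if item_name not in new_data:
--             new_data[item_name] = {}
--         new_data[item_name][data_type] = data[key]
--     return new_data
-- ===== SOURCE B (Python) =====
-- def prepare_new_item_list_data(data):
--     triples = []
--     for key in data:
--         if key != 'csrfmiddlewaretoken':
--             item_name, data_type = key.split('-')
--             triples.append((item_name, data_type, data[key]))
--     names = list(dict.fromkeys(name for name, _, _ in triples))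
--     return {name: {d: v for n, d, v in triples if n == name} for name in names}
-- ===== Notes on version B (the rewrite author's own statement) =====
-- stated objective: alternative
-- what changed: Instead of one pass inserting into a dict of dicts, B first parses all keys into (name, dtype, value) triples, takes the distinct names in order, and builds each product's inner dict by a comprehension scanning the triples for that name.
import Mathlib
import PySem

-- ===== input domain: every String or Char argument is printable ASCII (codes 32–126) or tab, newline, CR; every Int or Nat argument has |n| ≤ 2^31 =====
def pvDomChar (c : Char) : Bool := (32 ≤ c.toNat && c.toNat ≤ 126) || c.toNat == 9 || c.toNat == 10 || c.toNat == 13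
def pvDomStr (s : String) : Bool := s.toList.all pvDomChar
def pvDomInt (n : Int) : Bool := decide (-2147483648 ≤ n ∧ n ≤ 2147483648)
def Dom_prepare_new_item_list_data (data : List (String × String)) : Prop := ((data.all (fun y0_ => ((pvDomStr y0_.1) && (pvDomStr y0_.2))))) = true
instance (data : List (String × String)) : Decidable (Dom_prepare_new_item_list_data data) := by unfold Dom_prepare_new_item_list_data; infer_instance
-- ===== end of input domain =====

-- B replaces A's single-pass dict-of-dicts build by: parse keys into (name, dtype, value)
-- triples, dedup the names, then build each product's inner dict by scanning its triples
-- (an "alternative" decomposition, not claimed faster).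

-- ===== PORT A =====
def prepare_new_item_list_data (data : List (String × String)) : List (String × List (String × String)) :=
  let d := PySem.Dict.ofList data
  let new_data := d.items.foldl
    (fun (new_data : PySem.Dict String (PySem.Dict String String)) kv =>
      if kv.1 = "csrfmiddlewaretoken" then new_data
      else
        match PySem.Str.split? kv.1 "-" with
        | some [item_name, data_type] =>
          (if new_data.contains item_name then new_data
           else new_data.insert item_name PySem.Dict.empty).modify item_name PySem.Dict.empty
            (fun inner => inner.insert data_type kv.2)
        | _ => new_data)  -- Python raises ValueError here; such inputs are outside Pre_
    PySem.Dict.empty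
  new_data.items.map (fun p => (p.1, p.2.items))

-- ===== PORT B =====
-- B-side helper: 'item_name, data_type = key.split('-')' (none where Python's unpacking raises ValueError)
def pvSplit2 (s : String) : Option (String × String) :=
  let parts := (PySem.Str.split? s "-").getD []
  if parts.length = 2 then some (parts[0]!, parts[1]!) else none

def prepare_new_item_list_data_alt (data : List (String × String)) : List (String × List (String × String)) :=
  let d := PySem.Dict.ofList data
  let triples := d.items.foldl
    (fun (triples : List (String × String × String)) kv =>
      if kv.1 = "csrfmiddlewaretoken" then triples
      else
        match pvSplit2 kv.1 with
        | some (item_name, data_type) => triples ++ [(item_name, data_type, kv.2)]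
        | none => triples)  -- Python raises ValueError here; such inputs are outside Pre_
    []
  let names := PySem.List.dedup (triples.map (fun tr => tr.1))
  names.map (fun name => (name,
    ((triples.filter (fun tr => tr.1 == name)).foldl
      (fun (inner : PySem.Dict String String) tr => inner.insert tr.2.1 tr.2.2)
      PySem.Dict.empty).items))

-- ===== PRECONDITION & SPEC =====
-- Pre_ excludes exactly the inputs on which Python A raises ValueError: a key other than
-- 'csrfmiddlewaretoken' whose split('-') does not yield exactly two parts (count('-') ≠ 1).
def Pre_prepare_new_item_list_data (data : List (String × String)) : Prop :=
  ∀ p ∈ data, p.1 ≠ "csrfmiddlewaretoken" → PySem.Str.count p.1 "-" = 1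
instance (data : List (String × String)) : Decidable (Pre_prepare_new_item_list_data data) := by
  unfold Pre_prepare_new_item_list_data; infer_instance

def pvWitness_prepare_new_item_list_data : (List (String × String)) :=
  [("apple-price", "3"), ("csrfmiddlewaretoken", "tok"), ("apple-qty", "7"), ("pear-price", "2")]

def Spec_prepare_new_item_list_data (data : List (String × String)) (out : List (String × List (String × String))) : Prop := out = prepare_new_item_list_data_alt data
instance (data : List (String × String)) (out : List (String × List (String × String))) : Decidable (Spec_prepare_new_item_list_data data out) := by unfold Spec_prepare_new_item_list_data; infer_instance

-- ===== CLAIM (what is proved, stated in full; the proofs are below) =====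
def Claim_equal_prepare_new_item_list_data : Prop := ∀ (data : List (String × String)), Dom_prepare_new_item_list_data data → Pre_prepare_new_item_list_data data → Spec_prepare_new_item_list_data data (prepare_new_item_list_data data)

-- ===== LEMMAS AND PROOFS =====

-- the triple(s) one key contributes
def pvG (kv : String × String) : List (String × String × String) :=
  if kv.1 = "csrfmiddlewaretoken" then []
  else
    match PySem.Str.split? kv.1 "-" with
    | some [item_name, data_type] => [(item_name, data_type, kv.2)]
    | _ => []

-- B's triple-collecting loop is the flatMap of pvG
lemma pvB_triples_eq (L : List (String × String)) (acc : List (String × String × String)) :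
    L.foldl
      (fun (triples : List (String × String × String)) kv =>
        if kv.1 = "csrfmiddlewaretoken" then triples
        else
          match pvSplit2 kv.1 with
          | some (item_name, data_type) => triples ++ [(item_name, data_type, kv.2)]
          | none => triples) acc = acc ++ L.flatMap pvG := by
  induction L generalizing acc with
  | nil => simp
  | cons kv L ih =>
    simp only [List.foldl_cons, List.flatMap_cons, ih, pvG]
    by_cases h : kv.1 = "csrfmiddlewaretoken"
    · simp [h]
    · simp only [h, if_false]
      cases hs : PySem.Str.split? kv.1 "-" with
      | none => simp [pvSplit2, hs]
      | some parts =>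
        match parts with
        | [] => simp [pvSplit2, hs]
        | [a] => simp [pvSplit2, hs]
        | [a, b] => simp [pvSplit2, hs]
        | a :: b :: c :: rest => simp [pvSplit2, hs]

-- A's per-key update is a plain modify
lemma pvStepA_eq_modify (nd : PySem.Dict String (PySem.Dict String String)) (n t v : String) :
    (if nd.contains n then nd else nd.insert n PySem.Dict.empty).modify n PySem.Dict.empty
      (fun inner => inner.insert t v)
    = nd.modify n PySem.Dict.empty (fun inner => inner.insert t v) := by
  by_cases h : nd.contains n
  · simp [h]
  · simp only [h, Bool.false_eq_true, if_false, PySem.Dict.modify,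
      PySem.Dict.getD_insert_self, PySem.Dict.insert_insert_self,
      PySem.Dict.getD_of_not_contains nd PySem.Dict.empty (by simpa using h)]

-- A's loop over the items equals the modify-fold over the flatMap of pvG
lemma pvAfold_eq (L : List (String × String)) (nd : PySem.Dict String (PySem.Dict String String)) :
    L.foldl
      (fun (new_data : PySem.Dict String (PySem.Dict String String)) kv =>
        if kv.1 = "csrfmiddlewaretoken" then new_data
        else
          match PySem.Str.split? kv.1 "-" with
          | some [item_name, data_type] =>
            (if new_data.contains item_name then new_data
             else new_data.insert item_name PySem.Dict.empty).modify item_name PySem.Dict.empty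
              (fun inner => inner.insert data_type kv.2)
          | _ => new_data) nd
    = (L.flatMap pvG).foldl
        (fun nd tr => nd.modify tr.1 PySem.Dict.empty (fun inner => inner.insert tr.2.1 tr.2.2)) nd := by
  induction L generalizing nd with
  | nil => simp
  | cons kv L ih =>
    simp only [List.foldl_cons, List.flatMap_cons, List.foldl_append]
    rw [ih]
    congr 1
    simp only [pvG]
    by_cases h : kv.1 = "csrfmiddlewaretoken"
    · simp [h]
    · simp only [h, if_false]
      cases hs : PySem.Str.split? kv.1 "-" with
      | none => simp
      | some parts =>
        match parts with
        | [] => simp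
        | [a] => simp
        | [a, b] => simpa using pvStepA_eq_modify nd a b kv.2
        | a :: b :: c :: rest => simp

-- reading one group out of the modify-fold
lemma pvGetD_modfold (T : List (String × String × String))
    (d : PySem.Dict String (PySem.Dict String String)) (c : String) :
    (T.foldl
      (fun nd tr => nd.modify tr.1 PySem.Dict.empty (fun inner => inner.insert tr.2.1 tr.2.2)) d).getD c PySem.Dict.empty
    = (T.filter (fun tr => tr.1 == c)).foldl
        (fun (inner : PySem.Dict String String) tr => inner.insert tr.2.1 tr.2.2)
        (d.getD c PySem.Dict.empty) := by
  induction T generalizing d with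
  | nil => rfl
  | cons tr T ih =>
    simp only [List.foldl_cons, List.filter_cons]
    by_cases h : tr.1 = c
    · simp [ih, h]
    · simp [ih, PySem.Dict.getD_modify, h, Ne.symm h]


-- ===== VERDICT (by name: the statement is the Claim_ definition above) =====
theorem prepare_new_item_list_data_spec : Claim_equal_prepare_new_item_list_data := by
  intro data _ _
  unfold Spec_prepare_new_item_list_data prepare_new_item_list_data prepare_new_item_list_data_alt
  simp only [pvB_triples_eq _ [], List.nil_append, pvAfold_eq]
  set T := (PySem.Dict.ofList data).items.flatMap pvG with hT
  set D := T.foldl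
    (fun nd tr => nd.modify tr.1 PySem.Dict.empty (fun inner => inner.insert tr.2.1 tr.2.2))
    PySem.Dict.empty with hD
  have hnodup : D.keys.Nodup := by
    rw [hD]
    exact PySem.Dict.nodup_keys_foldl_modify_key T (fun tr => tr.1) PySem.Dict.empty
      (fun _ tr => fun inner => inner.insert tr.2.1 tr.2.2) PySem.Dict.empty
      PySem.Dict.nodup_keys_empty
  have hkeys : D.keys = PySem.List.dedup (T.map (fun tr => tr.1)) := by
    rw [hD]
    rw [PySem.Dict.keys_foldl_modify_key T (fun tr => tr.1) PySem.Dict.empty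
      (fun _ tr => fun inner => inner.insert tr.2.1 tr.2.2) PySem.Dict.empty]
    simp [PySem.Set.update_nil_left]
  rw [PySem.Dict.items_eq_map_keys D hnodup PySem.Dict.empty, hkeys, List.map_map]
  apply List.map_congr_left
  intro n hn
  simp only [Function.comp]
  congr 1
  rw [hD, pvGetD_modfold]
  simp [PySem.Dict.getD_empty]
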